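-- pv_equiv track=rewrite | github.com/evadechaux/CDD | CDD_local_FINAL.py | bit
-- ===== SOURCE A (Python) =====
-- def bit(efm):
--     b = ""
--     if len(efm)<32:
--         for i in range(len(efm),32):
--             b += "0"
--     for e in efm:
--         if e == 0:
--             b += "0"
--         else:
--             b += "1"
--     val = int(b,2)
--     return val
-- ===== SOURCE B (Python) =====
-- def bit(efm):
--     val = 0
--     for e in efm:
--         val = (val << 1) | (0 if e == 0 else 1)
--     return val
-- ===== Notes on version B (the rewrite author's own statement) =====
-- stated objective: idiomatic
-- what changed: Replaces the padded bit-string construction and int(b,2) parse with a single integer accumulator updated by shift-or (Horner's method); no string is built.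
import Mathlib
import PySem

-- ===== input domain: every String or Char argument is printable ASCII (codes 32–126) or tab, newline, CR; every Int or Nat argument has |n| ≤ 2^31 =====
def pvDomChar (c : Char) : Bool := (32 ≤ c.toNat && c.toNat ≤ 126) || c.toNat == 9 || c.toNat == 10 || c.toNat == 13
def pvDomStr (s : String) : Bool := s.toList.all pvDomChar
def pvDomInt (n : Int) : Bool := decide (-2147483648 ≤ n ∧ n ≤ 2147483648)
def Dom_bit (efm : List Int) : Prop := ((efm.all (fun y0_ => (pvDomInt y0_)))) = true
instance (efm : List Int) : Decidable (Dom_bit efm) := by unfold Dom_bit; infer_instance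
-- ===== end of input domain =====

-- B replaces A's padded bit-string + int(b,2) parse by a shift-or integer accumulator (idiomatic; no string built).

-- ===== PORT A =====
-- hand port of int(cs, 2): exact on the strings this program builds (nonempty, only '0'/'1'
-- characters, length ≥ 32), where Python's whitespace-strip, sign and '0b'-prefix steps are all
-- vacuous and only the left-to-right base-2 digit accumulation remains.
def pvIntBase2 (cs : List Char) : Int :=
  cs.foldl (fun a c => 2 * a + (if c = '0' then 0 else 1)) 0

def bit (efm : List Int) : Int :=
  let b : List Char := []
  let b : List Char :=
    if PySem.List.len efm < 32 then
      (PySem.List.pyRange (PySem.List.len efm) 32 1).foldl (fun acc _ => acc ++ ['0']) b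
    else b
  let b : List Char := efm.foldl (fun acc e => acc ++ [if e == 0 then '0' else '1']) b
  let val : Int := pvIntBase2 b
  val

-- ===== PORT B =====
def bit_alt (efm : List Int) : Int :=
  efm.foldl (fun val e => PySem.Int.bor (val <<< 1) (if e == 0 then 0 else 1)) 0

-- ===== PRECONDITION & SPEC =====
def Spec_bit (efm : List Int) (out : Int) : Prop := out = bit_alt efm
instance (efm : List Int) (out : Int) : Decidable (Spec_bit efm out) := by unfold Spec_bit; infer_instance

-- ===== CLAIM (what is proved, stated in full; the proofs are below) =====
def Claim_equal_bit : Prop := ∀ (efm : List Int), Dom_bit efm → Spec_bit efm (bit efm)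

-- ===== LEMMAS AND PROOFS =====

-- appending one char per element builds prefix ++ map
theorem pvFoldl_append_map (efm : List Int) (b : List Char) :
    efm.foldl (fun acc e => acc ++ [if e == 0 then '0' else '1']) b
      = b ++ efm.map (fun e => if e == 0 then '0' else '1') := by
  induction efm generalizing b with
  | nil => simp
  | cons x xs ih =>
      simp only [List.foldl_cons]
      rw [ih]
      simp [List.append_assoc]

-- the padding loop only appends '0' characters
theorem pvPad_all_zero (l : List Int) (b : List Char) (hb : ∀ c ∈ b, c = '0') :
    ∀ c ∈ l.foldl (fun acc _ => acc ++ ['0']) b, c = '0' := by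
  induction l generalizing b with
  | nil => exact hb
  | cons x xs ih =>
      intro c hc
      exact ih (b ++ ['0']) (by intro d hd; rcases List.mem_append.1 hd with h | h
                                · exact hb d h
                                · simpa using h) c hc

-- a fold over '0'-only characters keeps the accumulator 0
theorem pvIntBase2_zeros (p : List Char) (hp : ∀ c ∈ p, c = '0') :
    pvIntBase2 p = 0 := by
  unfold pvIntBase2
  induction p with
  | nil => rfl
  | cons c cs ih =>
      have hc : c = '0' := hp c (List.mem_cons_self ..)
      simp [hc]
      exact ih (fun d hd => hp d (List.mem_cons_of_mem _ hd))

theorem pvIntBase2_append (p q : List Char) :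
    pvIntBase2 (p ++ q) = q.foldl (fun a c => 2 * a + (if c = '0' then 0 else 1)) (pvIntBase2 p) := by
  unfold pvIntBase2
  exact List.foldl_append

-- shift-or step = Horner step on a nonnegative accumulator
theorem pvShift_one (m : Nat) : ((m : Int) <<< 1) = 2 * m := by
  have h : ((m : Int) <<< 1) = ((m <<< 1 : Nat) : Int) := by norm_cast
  rw [h, Nat.shiftLeft_eq]; push_cast; ring

theorem pvOr_one (m : Nat) : 2 * m ||| 1 = 2 * m + 1 := by
  have h := Nat.lor_bit false m true 0
  simp [Nat.bit] at h
  simpa [Nat.mul_comm] using h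

theorem pvStep_eq (v : Int) (hv : 0 ≤ v) (b : Int) (hb : b = 0 ∨ b = 1) :
    PySem.Int.bor (v <<< 1) b = 2 * v + b := by
  obtain ⟨m, rfl⟩ := Int.eq_ofNat_of_zero_le hv
  rcases hb with rfl | rfl
  · rw [PySem.Int.bor_zero, pvShift_one]
    ring
  · have h1 : ((m : Int) <<< 1) = ((2 * m : Nat) : Int) := by
      rw [pvShift_one]; push_cast; ring
    rw [h1, show (1 : Int) = ((1 : Nat) : Int) from rfl, PySem.Int.bor_natCast, pvOr_one]
    push_cast; ring

-- the two folds over efm agree from any nonnegative start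
theorem pvFolds_eq (efm : List Int) (v : Int) (hv : 0 ≤ v) :
    efm.foldl (fun a e => 2 * a + (if e == 0 then (0:Int) else 1)) v
      = efm.foldl (fun a e => PySem.Int.bor (a <<< 1) (if e == 0 then 0 else 1)) v := by
  induction efm generalizing v with
  | nil => rfl
  | cons x xs ih =>
      simp only [List.foldl_cons]
      rw [pvStep_eq v hv _ (by split <;> simp)]
      exact ih _ (by positivity)

-- the Horner fold over the mapped characters is the Horner fold over the ints
theorem pvMap_fold (efm : List Int) (v : Int) :
    (efm.map (fun e => if e == 0 then '0' else '1')).foldl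
        (fun a c => 2 * a + (if c = '0' then 0 else 1)) v
      = efm.foldl (fun a e => 2 * a + (if e == 0 then (0:Int) else 1)) v := by
  induction efm generalizing v with
  | nil => rfl
  | cons x xs ih =>
      simp only [List.map_cons, List.foldl_cons]
      by_cases hx : x = 0
      · simp only [hx, beq_self_eq_true, if_pos]
        simpa using ih (2 * v + 0)
      · simp only [if_neg hx, beq_iff_eq, if_neg (by decide : ¬ ('1' : Char) = '0')]
        simpa [hx] using ih (2 * v + 1)

-- ===== VERDICT (by name: the statement is the Claim_ definition above) =====
theorem bit_spec : Claim_equal_bit := by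
  intro efm _
  unfold Spec_bit bit bit_alt
  simp only []
  rw [pvFoldl_append_map]
  have hpad : ∀ c ∈ (if PySem.List.len efm < 32 then
      (PySem.List.pyRange (PySem.List.len efm) 32 1).foldl (fun acc _ => acc ++ ['0']) ([] : List Char)
    else ([] : List Char)), c = '0' := by
    split
    · exact pvPad_all_zero _ _ (by simp)
    · simp
  rw [pvIntBase2_append, pvIntBase2_zeros _ hpad, pvMap_fold, pvFolds_eq efm 0 le_rfl]
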